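-- pv_equiv track=rewrite | github.com/manwar/perlweeklychallenge-club | challenge-288/paulo-custodio/python/ch-2.py | calc_max_block
-- ===== SOURCE A (Python) =====
-- SEEN = ' '
--
-- def calc_max_block(m):
--     def size_block(m, ch, r, c):
--         m[r][c] = SEEN
--         count = 1
--         if r-1 >= 0:
--             if m[r-1][c] == ch:
--                 count += size_block(m, ch, r-1, c)
--         if r+1 < len(m):
--             if m[r+1][c] == ch:
--                 count += size_block(m, ch, r+1, c)
--         if c-1 >= 0:
--             if m[r][c-1] == ch:
--                 count += size_block(m, ch, r, c-1)
--         if c+1 < len(m[0]):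
--             if m[r][c+1] == ch:
--                 count += size_block(m, ch, r, c+1)
--         return count
--
--     max_block = 0
--     for r in range(len(m)):
--         for c in range(len(m[0])):
--             if m[r][c] != SEEN:
--                 block = size_block(m, m[r][c], r, c)
--                 max_block = max(max_block, block)
--     return max_block
-- ===== SOURCE B (Python) =====
-- SEEN = ' '
--
-- def calc_max_block(m):
--     # Iterative flood fill with an explicit stack; counts/marks on pop after
--     # re-checking the cell's value, so each cell is counted exactly once.
--     # Like the original, this mutates m in place (flooded cells become SEEN).
--     rows = len(m)
--     cols = len(m[0]) if m else 0
--     best = 0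
--     for r0 in range(rows):
--         for c0 in range(cols):
--             ch = m[r0][c0]
--             if ch == SEEN:
--                 continue
--             size = 0
--             stack = [(r0, c0)]
--             while stack:
--                 r, c = stack.pop()
--                 if m[r][c] != ch:
--                     continue
--                 m[r][c] = SEEN
--                 size += 1
--                 if c + 1 < cols:
--                     stack.append((r, c + 1))
--                 if c >= 1:
--                     stack.append((r, c - 1))
--                 if r + 1 < rows:
--                     stack.append((r + 1, c))
--                 if r >= 1:
--                     stack.append((r - 1, c))
--             best = max(best, size)
--     return best
-- ===== Notes on version B (the rewrite author's own statement) =====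
-- stated objective: idiomatic
-- what changed: The recursive depth-first size_block helper is replaced by an iterative flood fill with an explicit list-as-stack that re-checks each popped cell's value before marking and counting it, removing recursion (and Python's recursion-depth limit) while keeping the outer double loop and max accumulator.
import Mathlib
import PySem

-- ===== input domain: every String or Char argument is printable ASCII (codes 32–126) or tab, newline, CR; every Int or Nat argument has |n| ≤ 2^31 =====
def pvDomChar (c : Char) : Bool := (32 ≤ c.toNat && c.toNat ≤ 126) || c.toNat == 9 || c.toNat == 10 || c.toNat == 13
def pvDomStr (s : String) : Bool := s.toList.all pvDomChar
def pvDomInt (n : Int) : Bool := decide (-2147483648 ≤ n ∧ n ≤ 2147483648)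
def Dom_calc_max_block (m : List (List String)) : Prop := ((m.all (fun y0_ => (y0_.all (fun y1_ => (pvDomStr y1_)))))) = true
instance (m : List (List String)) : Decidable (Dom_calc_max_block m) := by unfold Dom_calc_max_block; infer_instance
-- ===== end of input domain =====

-- B replaces A's recursive DFS by an iterative flood fill with an explicit stack (count/mark on
-- pop, value re-checked before counting); equivalence is about the RETURN value only — both
-- Pythons also mutate m in place, marking exactly the same cells ' '.

-- ===== PORT A =====

-- m[r][c] (always guarded by bounds checks in both programs)
def pvGet (m : List (List String)) (r c : Nat) : String := (m.getD r []).getD c ""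

-- m[r][c] = v
def pvSet (m : List (List String)) (r c : Nat) (v : String) : List (List String) :=
  m.set r ((m.getD r []).set c v)

-- the statically in-bounds neighbours, in A's order up, down, left, right
-- (A's four sequential `if` blocks check these bounds against len(m)/len(m[0]), which never change)
def nbrsA (m : List (List String)) (r c : Nat) : List (Nat × Nat) :=
  (if 1 ≤ r then [(r - 1, c)] else []) ++
  (if r + 1 < m.length then [(r + 1, c)] else []) ++
  (if 1 ≤ c then [(r, c - 1)] else []) ++
  (if c + 1 < m.headI.length then [(r, c + 1)] else [])

-- size_block: mark the cell SEEN, then for each in-bounds neighbour in order, if it still equals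
-- ch, recurse and add.  The fuel argument is only a totality guard (each real call marks one
-- previously unmarked cell, so `total cells + 1` fuel is never exhausted on admitted inputs).
def sizeBlockA : Nat → List (List String) → String → Nat → Nat → Int × List (List String)
  | 0, m, _, _, _ => (0, m)
  | fuel + 1, m, ch, r, c =>
    (nbrsA m r c).foldl
      (fun p rc =>
        if pvGet p.2 rc.1 rc.2 = ch then
          (p.1 + (sizeBlockA fuel p.2 ch rc.1 rc.2).1, (sizeBlockA fuel p.2 ch rc.1 rc.2).2)
        else p)
      (1, pvSet m r c " ")

def calc_max_block (m : List (List String)) : Int :=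
  let fuel := (m.map List.length).sum + 1
  (((List.range m.length).foldl (fun (st : Int × List (List String)) r =>
      (List.range m.headI.length).foldl (fun st c =>
        if pvGet st.2 r c ≠ " " then
          let p := sizeBlockA fuel st.2 (pvGet st.2 r c) r c
          (max st.1 p.1, p.2)
        else st) st) (0, m))).1

-- ===== PORT B =====

-- while stack: pop (r,c); if the cell no longer equals ch skip it; otherwise mark it SEEN,
-- count it and push the in-bounds neighbours.  Fuel is only a totality guard.
def floodB : Nat → Nat → Nat → String → List (List String) → List (Nat × Nat) → Int → Int × List (List String)
  | 0, _, _, _, m, _, size => (size, m)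
  | _ + 1, _, _, _, m, [], size => (size, m)
  | fuel + 1, rows, cols, ch, m, (r, c) :: rest, size =>
    if pvGet m r c ≠ ch then floodB fuel rows cols ch m rest size
    else
      let m' := pvSet m r c " "
      let st1 := if c + 1 < cols then (r, c + 1) :: rest else rest
      let st2 := if 1 ≤ c then (r, c - 1) :: st1 else st1
      let st3 := if r + 1 < rows then (r + 1, c) :: st2 else st2
      let st4 := if 1 ≤ r then (r - 1, c) :: st3 else st3
      floodB fuel rows cols ch m' st4 (size + 1)

def calc_max_block_alt (m : List (List String)) : Int :=
  let rows := m.length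
  -- `len(m[0]) if m else 0`: List.headI [] = [] so headI.length is that value
  let cols := m.headI.length
  let fuel := 4 * (m.map List.length).sum + 2
  (((List.range rows).foldl (fun (st : Int × List (List String)) r0 =>
      (List.range cols).foldl (fun st c0 =>
        if pvGet st.2 r0 c0 = " " then st
        else
          let p := floodB fuel rows cols (pvGet st.2 r0 c0) st.2 [(r0, c0)] 0
          (max st.1 p.1, p.2)) st) (0, m))).1

-- ===== PRECONDITION & SPEC =====
-- Pre_ excludes exactly the ragged grids with some row shorter than row 0, on which Python A
-- raises IndexError (the outer loop's m[r][c] runs c up to len(m[0])-1 on every row).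
def Pre_calc_max_block (m : List (List String)) : Prop :=
  ∀ row ∈ m, m.headI.length ≤ row.length
instance (m : List (List String)) : Decidable (Pre_calc_max_block m) := by
  unfold Pre_calc_max_block; infer_instance

def pvWitness_calc_max_block : List (List String) := [["a", "b"], ["a", "a"]]

def Spec_calc_max_block (m : List (List String)) (out : Int) : Prop := out = calc_max_block_alt m
instance (m : List (List String)) (out : Int) : Decidable (Spec_calc_max_block m out) := by
  unfold Spec_calc_max_block; infer_instance

-- ===== CLAIM (what is proved, stated in full; the proofs are below) =====
def Claim_equal_calc_max_block : Prop := ∀ (m : List (List String)), Dom_calc_max_block m → Pre_calc_max_block m → Spec_calc_max_block m (calc_max_block m)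

-- ===== LEMMAS AND PROOFS =====

-- the sequence of A's neighbour checks, threading (count, grid) (proof-only view: sizeBlockA (f+1) = runA f after marking)
def runA (fuel : Nat) (ch : String) (todo : List (Nat × Nat)) (p : Int × List (List String)) :
    Int × List (List String) :=
  todo.foldl
    (fun p rc =>
      if pvGet p.2 rc.1 rc.2 = ch then
        (p.1 + (sizeBlockA fuel p.2 ch rc.1 rc.2).1, (sizeBlockA fuel p.2 ch rc.1 rc.2).2)
      else p) p


-- number of unmarked (non-SEEN) cells: each real flood-fill step decreases it
def nonSeen (m : List (List String)) : Nat :=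
  (m.map (fun row => row.countP (fun s => !(s == " ")))).sum

def totalLen (m : List (List String)) : Nat := (m.map List.length).sum

-- invariant of the grid threaded through both programs: lengths never change
def GridOK (m : List (List String)) (rows cols : Nat) : Prop :=
  m.length = rows ∧ m.headI.length = cols ∧ ∀ row ∈ m, cols ≤ row.length

-- all stack entries are in bounds
def StackOK (rows cols : Nat) (st : List (Nat × Nat)) : Prop :=
  ∀ p ∈ st, p.1 < rows ∧ p.2 < cols

-- potential of a floodB state: strictly decreases at every step
def Psi (m : List (List String)) (st : List (Nat × Nat)) : Nat := 4 * nonSeen m + st.length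

-- B's neighbour pushes, as a list (same elements/order as nbrsA once lengths are rewritten)
def nbrs (rows cols r c : Nat) : List (Nat × Nat) :=
  (if 1 ≤ r then [(r - 1, c)] else []) ++
  (if r + 1 < rows then [(r + 1, c)] else []) ++
  (if 1 ≤ c then [(r, c - 1)] else []) ++
  (if c + 1 < cols then [(r, c + 1)] else [])

lemma pvSet_map_length : ∀ (m : List (List String)) (r c : Nat) (v : String),
    (pvSet m r c v).map List.length = m.map List.length := by
  intro m
  induction m with
  | nil => intro r c v; rfl
  | cons row t ih =>
    intro r c v
    cases r with
    | zero => simp [pvSet]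
    | succ r => simpa [pvSet] using ih r c v

lemma totalLen_pvSet (m : List (List String)) (r c : Nat) (v : String) :
    totalLen (pvSet m r c v) = totalLen m := by
  unfold totalLen; rw [pvSet_map_length]

lemma headI_len_eq_of_map_len {m1 m2 : List (List String)}
    (h : m1.map List.length = m2.map List.length) : m1.headI.length = m2.headI.length := by
  cases m1 <;> cases m2 <;> simp_all

lemma GridOK_pvSet {m : List (List String)} {rows cols : Nat} (h : GridOK m rows cols)
    (r c : Nat) (v : String) : GridOK (pvSet m r c v) rows cols := by
  obtain ⟨h1, h2, h3⟩ := h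
  have hm := pvSet_map_length m r c v
  refine ⟨?_, ?_, ?_⟩
  · rw [← h1]
    simpa using congrArg List.length hm
  · rw [← h2]
    exact headI_len_eq_of_map_len hm
  · intro row hrow
    have hmem : row.length ∈ (pvSet m r c v).map List.length := List.mem_map_of_mem hrow
    rw [hm] at hmem
    obtain ⟨row', hrow', hlen⟩ := List.mem_map.1 hmem
    exact hlen ▸ h3 row' hrow'

lemma GridOK.rowlen {m : List (List String)} {rows cols : Nat} (h : GridOK m rows cols)
    {r : Nat} (hr : r < rows) : cols ≤ (m.getD r []).length := by
  have hr' : r < m.length := h.1 ▸ hr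
  rw [List.getD_eq_getElem m [] hr']
  exact h.2.2 _ (List.getElem_mem hr')

lemma countP_set : ∀ (row : List String) (c : Nat), c < row.length → row.getD c "" ≠ " " →
    (row.set c " ").countP (fun s => !(s == " ")) + 1 = row.countP (fun s => !(s == " ")) := by
  intro row
  induction row with
  | nil => intro c h; simp at h
  | cons a t ih =>
    intro c hc hne
    cases c with
    | zero =>
      simp only [List.getD_cons_zero] at hne
      simp [hne]
    | succ c =>
      have := ih c (by simpa using hc) (by simpa using hne)
      simp only [List.set_cons_succ, List.countP_cons]
      omega

lemma nonSeen_pvSet : ∀ (m : List (List String)) (r c : Nat), r < m.length →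
    c < (m.getD r []).length → pvGet m r c ≠ " " →
    nonSeen (pvSet m r c " ") + 1 = nonSeen m := by
  intro m
  induction m with
  | nil => intro r c hr; simp at hr
  | cons row t ih =>
    intro r c hr hc hne
    cases r with
    | zero =>
      have := countP_set row c (by simpa using hc) (by simpa [pvGet] using hne)
      simp only [pvSet, List.getD_cons_zero, List.set_cons_zero, nonSeen, List.map_cons,
        List.sum_cons]
      omega
    | succ r =>
      have := ih r c (by simpa using hr) (by simpa using hc) (by simpa [pvGet] using hne)
      simp only [pvSet, List.getD_cons_succ, List.set_cons_succ, nonSeen, List.map_cons,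
        List.sum_cons] at this ⊢
      omega

lemma nonSeen_le_totalLen : ∀ (m : List (List String)), nonSeen m ≤ totalLen m := by
  intro m
  induction m with
  | nil => simp [nonSeen, totalLen]
  | cons row t ih =>
    have := List.countP_le_length (l := row) (p := fun s => !(s == " "))
    simp only [nonSeen, totalLen, List.map_cons, List.sum_cons] at ih ⊢
    omega

lemma floodB_nil (f rows cols : Nat) (ch : String) (m : List (List String)) (size : Int) :
    floodB f rows cols ch m [] size = (size, m) := by
  cases f <;> rfl

lemma floodB_skip {m : List (List String)} {r c : Nat} {ch : String}
    (h : pvGet m r c ≠ ch) (f rows cols : Nat) (rest : List (Nat × Nat)) (size : Int) :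
    floodB (f + 1) rows cols ch m ((r, c) :: rest) size = floodB f rows cols ch m rest size := by
  simp [floodB, h]

lemma floodB_succ_match {m : List (List String)} {r c : Nat} {ch : String}
    (h : pvGet m r c = ch) (f rows cols : Nat) (rest : List (Nat × Nat)) (size : Int) :
    floodB (f + 1) rows cols ch m ((r, c) :: rest) size
      = floodB f rows cols ch (pvSet m r c " ") (nbrs rows cols r c ++ rest) (size + 1) := by
  simp only [floodB, h, ne_eq, not_true_eq_false, if_false]
  congr 1
  simp only [nbrs]
  split_ifs <;> simp

lemma length_nbrs_le (rows cols r c : Nat) : (nbrs rows cols r c).length ≤ 4 := by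
  simp [nbrs]; split_ifs <;> simp

lemma StackOK_nbrs {rows cols r c : Nat} (hr : r < rows) (hc : c < cols) :
    StackOK rows cols (nbrs rows cols r c) := by
  intro p hp
  obtain ⟨pr, pc⟩ := p
  change pr < rows ∧ pc < cols
  unfold nbrs at hp
  simp only [List.mem_append, List.mem_ite_nil_right, List.mem_singleton, Prod.mk.injEq] at hp
  rcases hp with ((⟨h, h1, h2⟩ | ⟨h, h1, h2⟩) | ⟨h, h1, h2⟩) | ⟨h, h1, h2⟩ <;>
    exact ⟨by omega, by omega⟩

lemma StackOK_append {rows cols : Nat} {a b : List (Nat × Nat)}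
    (ha : StackOK rows cols a) (hb : StackOK rows cols b) : StackOK rows cols (a ++ b) := by
  intro p hp; rcases List.mem_append.1 hp with h | h; exacts [ha p h, hb p h]

lemma nbrsA_eq {m : List (List String)} {rows cols : Nat} (h : GridOK m rows cols) (r c : Nat) :
    nbrsA m r c = nbrs rows cols r c := by
  simp [nbrsA, nbrs, h.1, h.2.1]

lemma floodB_stable {rows cols : Nat} {ch : String} (hch : ch ≠ " ") :
    ∀ (fB : Nat) (m : List (List String)) (st : List (Nat × Nat)) (size : Int) (fB' : Nat),
    GridOK m rows cols → StackOK rows cols st →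
    Psi m st < fB → Psi m st < fB' →
    floodB fB rows cols ch m st size = floodB fB' rows cols ch m st size := by
  intro fB
  induction fB with
  | zero => intro m st size fB' _ _ hlt _; exact absurd hlt (Nat.not_lt_zero _)
  | succ g ih =>
    intro m st size fB' hG hS hlt hlt'
    rcases st with _ | ⟨⟨r, c⟩, rest⟩
    · rw [floodB_nil, floodB_nil]
    · cases fB' with
      | zero => exact absurd hlt' (Nat.not_lt_zero _)
      | succ g' =>
        have hr : r < rows := (hS (r, c) (List.mem_cons_self ..)).1
        have hc : c < cols := (hS (r, c) (List.mem_cons_self ..)).2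
        have hSr : StackOK rows cols rest := fun q hq => hS q (List.mem_cons_of_mem _ hq)
        by_cases h : pvGet m r c = ch
        · rw [floodB_succ_match h, floodB_succ_match h]
          have hrm : r < m.length := hG.1 ▸ hr
          have hcm : c < (m.getD r []).length := lt_of_lt_of_le hc (hG.rowlen hr)
          have hdec := nonSeen_pvSet m r c hrm hcm (by rw [h]; exact hch)
          have hlen := length_nbrs_le rows cols r c
          exact ih _ _ _ g' (GridOK_pvSet hG r c " ") (StackOK_append (StackOK_nbrs hr hc) hSr)
            (by simp only [Psi, List.length_append, List.length_cons] at hlt ⊢; omega)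
            (by simp only [Psi, List.length_append, List.length_cons] at hlt' ⊢; omega)
        · rw [floodB_skip h, floodB_skip h]
          exact ih _ _ _ g' hG hSr
            (by simp only [Psi, List.length_cons] at hlt ⊢; omega)
            (by simp only [Psi, List.length_cons] at hlt' ⊢; omega)

lemma runA_shift {fuel : Nat} {ch : String} : ∀ (todo : List (Nat × Nat)) (s : Int)
    (m : List (List String)),
    runA fuel ch todo (s, m)
      = (s + (runA fuel ch todo (0, m)).1, (runA fuel ch todo (0, m)).2) := by
  intro todo
  induction todo with
  | nil => intro s m; simp [runA]
  | cons rc t ih =>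
    intro s m
    by_cases h : pvGet m rc.1 rc.2 = ch
    · have e : ∀ (z : Int), runA fuel ch (rc :: t) (z, m)
          = runA fuel ch t (z + (sizeBlockA fuel m ch rc.1 rc.2).1,
              (sizeBlockA fuel m ch rc.1 rc.2).2) := by
        intro z; simp only [runA, List.foldl_cons]; rw [if_pos h]
      rw [e, e]
      rw [ih (s + (sizeBlockA fuel m ch rc.1 rc.2).1) (sizeBlockA fuel m ch rc.1 rc.2).2,
          ih (0 + (sizeBlockA fuel m ch rc.1 rc.2).1) (sizeBlockA fuel m ch rc.1 rc.2).2]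
      dsimp only
      exact Prod.ext (by ring) rfl
    · have e : ∀ (z : Int), runA fuel ch (rc :: t) (z, m) = runA fuel ch t (z, m) := by
        intro z; simp only [runA, List.foldl_cons]; rw [if_neg h]
      rw [e, e]
      exact ih s m

lemma A_post {rows cols : Nat} : ∀ (f : Nat) (m : List (List String)) (ch : String) (r c : Nat),
    nonSeen m < f → GridOK m rows cols → r < rows → c < cols →
    pvGet m r c = ch → ch ≠ " " →
    GridOK (sizeBlockA f m ch r c).2 rows cols ∧
    nonSeen (sizeBlockA f m ch r c).2 < nonSeen m ∧
    totalLen (sizeBlockA f m ch r c).2 = totalLen m := by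
  intro f
  induction f with
  | zero => intro m ch r c hn; exact absurd hn (Nat.not_lt_zero _)
  | succ f ih =>
    intro m ch r c hn hG hr hc hget hch
    have hunf : sizeBlockA (f + 1) m ch r c = runA f ch (nbrsA m r c) (1, pvSet m r c " ") := rfl
    have hrm : r < m.length := hG.1 ▸ hr
    have hcm : c < (m.getD r []).length := lt_of_lt_of_le hc (hG.rowlen hr)
    have hdec := nonSeen_pvSet m r c hrm hcm (by rw [hget]; exact hch)
    have hG0 : GridOK (pvSet m r c " ") rows cols := GridOK_pvSet hG r c " "
    have hmf : nonSeen (pvSet m r c " ") < f := by omega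
    have main : ∀ (todo : List (Nat × Nat)), StackOK rows cols todo →
        ∀ (p : Int × List (List String)), GridOK p.2 rows cols →
        nonSeen p.2 ≤ nonSeen (pvSet m r c " ") → totalLen p.2 = totalLen (pvSet m r c " ") →
        GridOK (runA f ch todo p).2 rows cols ∧
        nonSeen (runA f ch todo p).2 ≤ nonSeen (pvSet m r c " ") ∧
        totalLen (runA f ch todo p).2 = totalLen (pvSet m r c " ") := by
      intro todo
      induction todo with
      | nil =>
        intro _ p h1 h2 h3
        have e : runA f ch [] p = p := by simp [runA]
        rw [e]
        exact ⟨h1, h2, h3⟩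
      | cons rc t iht =>
        intro hS p h1 h2 h3
        have hSt : StackOK rows cols t := fun q hq => hS q (List.mem_cons_of_mem _ hq)
        by_cases hm : pvGet p.2 rc.1 rc.2 = ch
        · have hb := hS rc (List.mem_cons_self ..)
          have hpost := ih p.2 ch rc.1 rc.2 (by omega) h1 hb.1 hb.2 hm hch
          have e : runA f ch (rc :: t) p
              = runA f ch t (p.1 + (sizeBlockA f p.2 ch rc.1 rc.2).1,
                  (sizeBlockA f p.2 ch rc.1 rc.2).2) := by
            simp only [runA, List.foldl_cons]; rw [if_pos hm]
          rw [e]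
          exact iht hSt _ hpost.1 (le_trans (le_of_lt hpost.2.1) h2) (hpost.2.2.trans h3)
        · have e : runA f ch (rc :: t) p = runA f ch t p := by
            simp only [runA, List.foldl_cons]; rw [if_neg hm]
          rw [e]
          exact iht hSt p h1 h2 h3
    have hres := main (nbrsA m r c)
      (by rw [nbrsA_eq hG]; exact StackOK_nbrs hr hc)
      (1, pvSet m r c " ") hG0 le_rfl rfl
    rw [hunf]
    exact ⟨hres.1, by omega, hres.2.2.trans (totalLen_pvSet m r c " ")⟩

lemma bisim_cell {rows cols : Nat} {ch : String} (hch : ch ≠ " ") :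
    ∀ (f : Nat) (m : List (List String)) (r c : Nat) (rest : List (Nat × Nat)) (size : Int)
      (fB fB' : Nat),
    nonSeen m < f → GridOK m rows cols → r < rows → c < cols → StackOK rows cols rest →
    pvGet m r c = ch →
    Psi m ((r, c) :: rest) < fB → Psi (sizeBlockA f m ch r c).2 rest < fB' →
    floodB fB rows cols ch m ((r, c) :: rest) size
      = floodB fB' rows cols ch (sizeBlockA f m ch r c).2 rest (size + (sizeBlockA f m ch r c).1) := by
  intro f
  induction f with
  | zero => intro m r c rest size fB fB' hn; exact absurd hn (Nat.not_lt_zero _)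
  | succ f ih =>
    intro m r c rest size fB fB' hn hG hr hc hSrest hget hPsi hPsi'
    have hrm : r < m.length := hG.1 ▸ hr
    have hcm : c < (m.getD r []).length := lt_of_lt_of_le hc (hG.rowlen hr)
    have hdec := nonSeen_pvSet m r c hrm hcm (by rw [hget]; exact hch)
    have hG0 : GridOK (pvSet m r c " ") rows cols := GridOK_pvSet hG r c " "
    have hmf : nonSeen (pvSet m r c " ") < f := by omega
    have main : ∀ (todo : List (Nat × Nat)), StackOK rows cols todo →
        ∀ (m1 : List (List String)) (rest1 : List (Nat × Nat)) (size1 : Int) (g g' : Nat),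
        GridOK m1 rows cols → StackOK rows cols rest1 → nonSeen m1 < f →
        Psi m1 (todo ++ rest1) < g → Psi (runA f ch todo (0, m1)).2 rest1 < g' →
        floodB g rows cols ch m1 (todo ++ rest1) size1
          = floodB g' rows cols ch (runA f ch todo (0, m1)).2 rest1
              (size1 + (runA f ch todo (0, m1)).1) := by
      intro todo
      induction todo with
      | nil =>
        intro _ m1 rest1 size1 g g' hG1 hS1 _ hg hg'
        have e : runA f ch [] ((0 : Int), m1) = ((0 : Int), m1) := by simp [runA]
        rw [e] at hg' ⊢
        simpa using floodB_stable hch g m1 rest1 size1 g' hG1 hS1 (by simpa using hg) hg'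
      | cons rc t iht =>
        intro hStodo m1 rest1 size1 g g' hG1 hS1 hnm1 hg hg'
        obtain ⟨a, b⟩ := rc
        have hSt : StackOK rows cols t := fun q hq => hStodo q (List.mem_cons_of_mem _ hq)
        have hb := hStodo (a, b) (List.mem_cons_self ..)
        by_cases hm : pvGet m1 a b = ch
        · have hpost := A_post f m1 ch a b hnm1 hG1 hb.1 hb.2 hm hch
          have e : runA f ch ((a, b) :: t) ((0 : Int), m1)
              = runA f ch t ((0 : Int) + (sizeBlockA f m1 ch a b).1,
                  (sizeBlockA f m1 ch a b).2) := by
            simp only [runA, List.foldl_cons]; rw [if_pos hm]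
          have e2 : runA f ch ((a, b) :: t) ((0 : Int), m1)
              = ((sizeBlockA f m1 ch a b).1 + (runA f ch t (0, (sizeBlockA f m1 ch a b).2)).1,
                 (runA f ch t (0, (sizeBlockA f m1 ch a b).2)).2) := by
            rw [e, runA_shift]; refine Prod.ext ?_ rfl; simp only []; ring
          have hcell := ih m1 a b (t ++ rest1) size1 g
              (Psi (sizeBlockA f m1 ch a b).2 (t ++ rest1) + 1)
              hnm1 hG1 hb.1 hb.2 (StackOK_append hSt hS1) hm
              (by simpa using hg) (Nat.lt_succ_self _)
          rw [List.cons_append, hcell]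
          rw [e2] at hg' ⊢
          simp only [] at hg' ⊢
          have hres := iht hSt (sizeBlockA f m1 ch a b).2 rest1
              (size1 + (sizeBlockA f m1 ch a b).1)
              (Psi (sizeBlockA f m1 ch a b).2 (t ++ rest1) + 1) g'
              hpost.1 hS1 (by omega) (Nat.lt_succ_self _) hg'
          rw [hres]
          congr 1
          ring
        · cases g with
          | zero => exact absurd hg (Nat.not_lt_zero _)
          | succ g0 =>
            have e : runA f ch ((a, b) :: t) ((0 : Int), m1) = runA f ch t ((0 : Int), m1) := by
              simp only [runA, List.foldl_cons]; rw [if_neg hm]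
            rw [List.cons_append] at hg ⊢
            rw [floodB_skip hm, e]
            rw [e] at hg'
            exact iht hSt m1 rest1 size1 g0 g' hG1 hS1 hnm1
              (by simp only [Psi, List.length_cons, List.length_append] at hg ⊢; omega)
              hg'
    have hunf : sizeBlockA (f + 1) m ch r c
        = runA f ch (nbrs rows cols r c) (1, pvSet m r c " ") := by
      rw [← nbrsA_eq hG r c]; rfl
    have hunf2 : sizeBlockA (f + 1) m ch r c
        = (1 + (runA f ch (nbrs rows cols r c) (0, pvSet m r c " ")).1,
           (runA f ch (nbrs rows cols r c) (0, pvSet m r c " ")).2) := by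
      rw [hunf, runA_shift]
    cases fB with
    | zero => exact absurd hPsi (Nat.not_lt_zero _)
    | succ g =>
      rw [floodB_succ_match hget]
      rw [hunf2] at hPsi' ⊢
      simp only [] at hPsi' ⊢
      have hmain := main (nbrs rows cols r c) (StackOK_nbrs hr hc) (pvSet m r c " ") rest
          (size + 1) g fB' hG0 hSrest hmf
          (by
            have hlen := length_nbrs_le rows cols r c
            simp only [Psi, List.length_append, List.length_cons] at hPsi ⊢
            omega)
          hPsi'
      rw [hmain]
      congr 1
      ring

lemma foldl_eq_inv {alpha sigma : Type} (f g : sigma → alpha → sigma) (Inv : sigma → Prop) :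
    ∀ (L : List alpha) (s : sigma),
    (∀ s a, a ∈ L → Inv s → f s a = g s a ∧ Inv (f s a)) → Inv s →
    L.foldl f s = L.foldl g s ∧ Inv (L.foldl f s) := by
  intro L
  induction L with
  | nil => exact fun s _ hs => ⟨rfl, hs⟩
  | cons a t ih =>
    intro s h hs
    obtain ⟨heq, hinv⟩ := h s a (List.mem_cons_self ..) hs
    have := ih (f s a) (fun s b hb => h s b (List.mem_cons_of_mem _ hb)) hinv
    simpa [List.foldl_cons, heq] using this

theorem calc_max_block_spec : Claim_equal_calc_max_block := by
  intro m _ hpre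
  unfold Spec_calc_max_block
  have hG : GridOK m m.length m.headI.length := ⟨rfl, rfl, hpre⟩
  simp only [calc_max_block, calc_max_block_alt]
  refine congrArg Prod.fst ?_
  refine (foldl_eq_inv _ _
      (fun st : Int × List (List String) =>
        GridOK st.2 m.length m.headI.length ∧ totalLen st.2 = totalLen m)
      _ _ ?_ ⟨hG, rfl⟩).1
  intro st r hrmem hinv
  have hr : r < m.length := List.mem_range.1 hrmem
  refine foldl_eq_inv _ _
      (fun st : Int × List (List String) =>
        GridOK st.2 m.length m.headI.length ∧ totalLen st.2 = totalLen m)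
      _ _ ?_ hinv
  intro st2 c hcmem hinv2
  have hc : c < m.headI.length := List.mem_range.1 hcmem
  obtain ⟨hGst, hT⟩ := hinv2
  by_cases hsp : pvGet st2.2 r c = " "
  · constructor
    · simp [hsp]
    · simpa [hsp] using ⟨hGst, hT⟩
  · have hns : nonSeen st2.2 ≤ totalLen m := hT ▸ nonSeen_le_totalLen st2.2
    have hns' : nonSeen st2.2 ≤ (m.map List.length).sum := hns
    have hpost := A_post ((m.map List.length).sum + 1) st2.2 (pvGet st2.2 r c) r c
      (by omega) hGst hr hc rfl hsp
    have hbis := bisim_cell hsp ((m.map List.length).sum + 1) st2.2 r c [] 0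
      (4 * (m.map List.length).sum + 2)
      (Psi (sizeBlockA ((m.map List.length).sum + 1) st2.2 (pvGet st2.2 r c) r c).2 [] + 1)
      (by omega) hGst hr hc (by intro q hq; simp at hq) rfl
      (by simp only [Psi, List.length_cons, List.length_nil]; omega)
      (Nat.lt_succ_self _)
    rw [floodB_nil] at hbis
    constructor
    · simp only [hsp, ne_eq, not_false_eq_true, if_true, if_false]
      rw [hbis]
      simp
    · simp only [hsp, ne_eq, not_false_eq_true, if_true]
      exact ⟨hpost.1, hpost.2.2.trans hT⟩
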